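-- pv_equiv track=rewrite | github.com/inwk6312winter2019/openbookfinal-khyathinalluri | task2a.py | common_words
-- ===== SOURCE A (Python) =====
-- def common_words(l1,l2,l3):
-- 	d={}
-- 	for word in l1:
-- 		if word in l2:
-- 			if word in l3:
-- 				if word not in d:
-- 					d[word]=1
-- 				else:
-- 					d[word]+=1
--
-- 	return d
-- ===== SOURCE B (Python) =====
-- def common_words(l1, l2, l3):
--     # Count every word of l1 once, then filter the frequency table by
--     # membership in set(l2) and set(l3) in a second pass.
--     freq = {}
--     for w in l1:
--         if w in freq:
--             freq[w] += 1
--         else: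
--             freq[w] = 1
--     s2 = set(l2)
--     s3 = set(l3)
--     return {w: c for w, c in freq.items() if w in s2 and w in s3}
-- ===== Notes on version B (the rewrite author's own statement) =====
-- stated objective: faster
-- what changed: Instead of testing list membership of each l1 word inside the counting loop (an O(len(l2)+len(l3)) scan per word), B builds the full frequency table of l1 first, precomputes set(l2) and set(l3), and filters the distinct words in a single second pass with O(1) set lookups.
import Mathlib
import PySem

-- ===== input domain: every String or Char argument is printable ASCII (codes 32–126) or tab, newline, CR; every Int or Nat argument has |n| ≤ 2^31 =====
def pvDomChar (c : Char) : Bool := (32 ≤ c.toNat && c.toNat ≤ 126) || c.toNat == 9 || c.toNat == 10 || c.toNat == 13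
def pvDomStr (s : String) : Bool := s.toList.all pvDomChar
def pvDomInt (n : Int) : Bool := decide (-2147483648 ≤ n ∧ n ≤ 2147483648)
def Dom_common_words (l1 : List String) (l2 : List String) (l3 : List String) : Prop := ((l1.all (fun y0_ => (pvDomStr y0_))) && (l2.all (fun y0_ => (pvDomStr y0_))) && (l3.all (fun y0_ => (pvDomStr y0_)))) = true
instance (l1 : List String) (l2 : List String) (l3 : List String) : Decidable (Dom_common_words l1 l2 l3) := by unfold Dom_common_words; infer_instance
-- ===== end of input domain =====

-- B changes the decomposition: count all of l1 first, then filter the table by set(l2)/set(l3)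
-- in a second pass (asymptotically faster than A's per-word list scans).

-- ===== PORT A =====
-- A: one loop over l1; a word is counted only if it is in l2 and in l3.
-- 'd[word] += 1' is ported as insert word (d.getD word 0 + 1): exact, since word is then a key of d.
def common_words (l1 : List String) (l2 : List String) (l3 : List String) : List (String × Int) :=
  (l1.foldl (fun d word =>
      if l2.contains word then
        if l3.contains word then
          if !(d.contains word) then d.insert word 1
          else d.insert word (d.getD word 0 + 1)
        else d
      else d) (PySem.Dict.empty : PySem.Dict String Int)).items

-- ===== PORT B =====
-- B: full frequency table of l1, then the dict comprehension filtering by s2 and s3.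
-- freq's keys are distinct, so the comprehension's dict is exactly the filtered items list.
def common_words_alt (l1 : List String) (l2 : List String) (l3 : List String) : List (String × Int) :=
  let freq := l1.foldl (fun d w =>
      if d.contains w then d.insert w (d.getD w 0 + 1) else d.insert w 1)
    (PySem.Dict.empty : PySem.Dict String Int)
  let s2 := PySem.Set.ofList l2
  let s3 := PySem.Set.ofList l3
  freq.items.filter (fun p => PySem.Set.contains s2 p.1 && PySem.Set.contains s3 p.1)

-- ===== PRECONDITION & SPEC =====
def Spec_common_words (l1 : List String) (l2 : List String) (l3 : List String) (out : List (String × Int)) : Prop := out = common_words_alt l1 l2 l3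
instance (l1 : List String) (l2 : List String) (l3 : List String) (out : List (String × Int)) : Decidable (Spec_common_words l1 l2 l3 out) := by unfold Spec_common_words; infer_instance

-- ===== CLAIM (what is proved, stated in full; the proofs are below) =====
def Claim_equal_common_words : Prop := ∀ (l1 : List String) (l2 : List String) (l3 : List String), Dom_common_words l1 l2 l3 → Spec_common_words l1 l2 l3 (common_words l1 l2 l3)

-- ===== LEMMAS AND PROOFS =====

-- Both counting steps are the plain counter step.
theorem bump_eq (d : PySem.Dict String Int) (w : String) :
    (if d.contains w then d.insert w (d.getD w 0 + 1) else d.insert w 1)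
      = d.insert w (d.getD w 0 + 1) := by
  by_cases h : d.contains w = true
  · simp [h]
  · have h' : d.contains w = false := by simpa using h
    rw [if_neg (by simp [h']), PySem.Dict.getD_of_not_contains d 0 h']; norm_num

theorem bumpA_eq (d : PySem.Dict String Int) (w : String) :
    (if !(d.contains w) then d.insert w 1 else d.insert w (d.getD w 0 + 1))
      = d.insert w (d.getD w 0 + 1) := by
  by_cases h : d.contains w = true
  · simp [h]
  · have h' : d.contains w = false := by simpa using h
    rw [if_pos (by simp [h']), PySem.Dict.getD_of_not_contains d 0 h']; norm_num

-- set(filter) = filter(set)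
theorem ofList_filter (p : String → Bool) (l : List String) :
    PySem.Set.ofList (l.filter p) = (PySem.Set.ofList l).filter p := by
  induction l using List.reverseRecOn with
  | nil => simp [PySem.Set.ofList_nil]
  | append_singleton xs x ih =>
    rw [List.filter_append, PySem.Set.ofList_append_singleton]
    by_cases hp : p x = true
    · rw [show List.filter p [x] = [x] from by simp [hp], PySem.Set.ofList_append_singleton]
      by_cases hx : x ∈ xs
      · rw [PySem.Set.add_of_mem ((PySem.Set.mem_ofList _ _).mpr hx),
          PySem.Set.add_of_mem ((PySem.Set.mem_ofList _ _).mpr (List.mem_filter.mpr ⟨hx, hp⟩))]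
        exact ih
      · rw [PySem.Set.add_of_not_mem (fun hm => hx ((PySem.Set.mem_ofList _ _).mp hm)),
          PySem.Set.add_of_not_mem
            (fun hm => hx (List.mem_filter.mp ((PySem.Set.mem_ofList _ _).mp hm)).1),
          List.filter_append, ih]
        simp [hp]
    · rw [show List.filter p [x] = [] from by simp [hp], List.append_nil]
      by_cases hx : x ∈ xs
      · rw [PySem.Set.add_of_mem ((PySem.Set.mem_ofList _ _).mpr hx)]
        exact ih
      · rw [PySem.Set.add_of_not_mem (fun hm => hx ((PySem.Set.mem_ofList _ _).mp hm)),
          List.filter_append, ih]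
        simp [hp]

-- A's loop is the counter of the filtered list.
theorem portA_eq_counter (l1 l2 l3 : List String) :
    common_words l1 l2 l3
      = (PySem.Dict.counter (l1.filter (fun w => l2.contains w && l3.contains w))).items := by
  unfold common_words
  have hstep : (fun (d : PySem.Dict String Int) (word : String) =>
      if l2.contains word then
        if l3.contains word then
          if !(d.contains word) then d.insert word 1
          else d.insert word (d.getD word 0 + 1)
        else d
      else d)
      = (fun d word =>
          if l2.contains word && l3.contains word then d.insert word (d.getD word 0 + 1) else d) := by
    funext d word
    rw [bumpA_eq]
    by_cases h2 : l2.contains word = true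
    · by_cases h3 : l3.contains word = true
      · rw [if_pos h2, if_pos h3, if_pos (show (l2.contains word && l3.contains word) = true by rw [h2, h3]; decide)]
      · have m3 : word ∉ l3 := by simpa using h3
        rw [if_pos h2, if_neg h3, if_neg (by simp [m3])]
    · have m2 : word ∉ l2 := by simpa using h2
      rw [if_neg h2, if_neg (by simp [m2])]
  rw [hstep, PySem.List.foldl_if_eq_foldl_filter,
    PySem.Dict.foldl_insert_getD_add_one_eq_counter]

-- ===== VERDICT (by name: the statement is the Claim_ definition above) =====
theorem common_words_spec : Claim_equal_common_words := by
  intro l1 l2 l3 _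
  unfold Spec_common_words
  rw [portA_eq_counter]
  unfold common_words_alt
  have hfreq : l1.foldl (fun (d : PySem.Dict String Int) w =>
      if d.contains w then d.insert w (d.getD w 0 + 1) else d.insert w 1) PySem.Dict.empty
      = PySem.Dict.counter l1 := by
    rw [show (fun (d : PySem.Dict String Int) w =>
        if d.contains w then d.insert w (d.getD w 0 + 1) else d.insert w 1)
        = (fun d w => d.insert w (d.getD w 0 + 1)) from funext fun d => funext fun w => bump_eq d w]
    exact PySem.Dict.foldl_insert_getD_add_one_eq_counter l1
  simp only [hfreq]
  rw [PySem.Dict.items_counter, PySem.Dict.items_counter]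
  set P : String → Bool := fun w => l2.contains w && l3.contains w with hP
  have hcond : (fun (p : String × Int) =>
      PySem.Set.contains (PySem.Set.ofList l2) p.1 && PySem.Set.contains (PySem.Set.ofList l3) p.1)
      = (fun p => P p.1) := by
    funext p
    simp [hP, PySem.Set.contains_eq_listContains, PySem.Set.mem_ofList]
  rw [hcond, List.filter_map]
  have hcomp : ((fun (p : String × Int) => P p.1) ∘ (fun k => (k, (l1.count k : Int)))) = P := rfl
  rw [hcomp, ofList_filter]
  apply List.map_congr_left
  intro k hk
  have hkP : P k = true := (List.mem_filter.mp hk).2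
  have hcnt : ∀ l : List String, (l.filter P).count k = l.count k := by
    intro l
    induction l with
    | nil => rfl
    | cons a t ih =>
      by_cases ha : a = k
      · subst ha; simp [hkP, ih]
      · rw [List.filter_cons]
        split_ifs with hPa
        · simp [ha, ih]
        · exact ih.trans (by simp [ha])
  simp [hcnt]
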